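-- pv_equiv track=rewrite | github.com/Karmaaa7/Karmasr | test.py | get_year_range
-- ===== SOURCE A (Python) =====
-- def get_year_range(data):
--     years = []
--     for row in data:
--         try:
--             years.append(int(row['Year']))
--         except:
--             continue
--     if years:
--         return min(years), max(years)
--     else:
--         return None, None
-- ===== SOURCE B (Python) =====
-- def get_year_range(data):
--     lo = hi = None
--     for row in data:
--         try:
--             y = int(row['Year'])
--         except:
--             continue
--         if lo is None:
--             lo = hi = y
--         else:
--             lo = min(lo, y)
--             hi = max(hi, y)
--     return lo, hi
-- ===== Notes on version B (the rewrite author's own statement) =====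
-- stated objective: simpler
-- what changed: B streams once over the rows keeping running min/max accumulators instead of materialising a list of all parsed years and scanning it twice with min() and max().
import Mathlib
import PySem

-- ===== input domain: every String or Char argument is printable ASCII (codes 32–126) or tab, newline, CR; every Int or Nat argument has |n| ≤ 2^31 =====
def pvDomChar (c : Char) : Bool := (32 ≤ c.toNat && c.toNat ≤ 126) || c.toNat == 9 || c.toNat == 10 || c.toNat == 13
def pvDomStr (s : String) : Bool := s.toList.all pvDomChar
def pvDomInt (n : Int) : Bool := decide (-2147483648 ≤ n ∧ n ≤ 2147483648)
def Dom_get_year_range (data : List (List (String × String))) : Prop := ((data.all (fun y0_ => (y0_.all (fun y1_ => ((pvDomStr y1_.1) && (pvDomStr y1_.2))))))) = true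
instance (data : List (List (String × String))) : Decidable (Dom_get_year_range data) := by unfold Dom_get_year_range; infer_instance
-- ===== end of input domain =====

-- ===== PORT A =====
-- B rewrites A's build-a-list-then-scan-twice into one streaming pass with two accumulators (simpler, O(1) space).
def get_year_range (data : List (List (String × String))) : Option Int × Option Int :=
  let years : List Int := data.foldl (fun years row =>
    match (PySem.Dict.mk row).get? "Year" with
    | none => years                        -- KeyError swallowed by bare except
    | some s =>
      match PySem.Int.ofStr? s with
      | none => years                      -- ValueError swallowed by bare except
      | some y => years ++ [y]) []
  match years with
  | [] => (none, none)
  | _ => (PySem.List.min? years (fun y => y), PySem.List.max? years (fun y => y))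

-- ===== PORT B =====
def get_year_range_alt (data : List (List (String × String))) : Option Int × Option Int :=
  data.foldl (fun st row =>
    match (PySem.Dict.mk row).get? "Year" with
    | none => st
    | some s =>
      match PySem.Int.ofStr? s with
      | none => st
      | some y =>
        match st with
        | (some lo, some hi) => (some (min lo y), some (max hi y))
        | _ => (some y, some y)) (none, none)

-- ===== PRECONDITION & SPEC =====
def Spec_get_year_range (data : List (List (String × String))) (out : Option Int × Option Int) : Prop := out = get_year_range_alt data
instance (data : List (List (String × String))) (out : Option Int × Option Int) : Decidable (Spec_get_year_range data out) := by unfold Spec_get_year_range; infer_instance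

-- ===== CLAIM (what is proved, stated in full; the proofs are below) =====
def Claim_equal_get_year_range : Prop := ∀ (data : List (List (String × String))), Dom_get_year_range data → Spec_get_year_range data (get_year_range data)

-- ===== LEMMAS AND PROOFS =====

-- the state B maintains, as a function of the list A has accumulated so far
def pvMM (ys : List Int) : Option Int × Option Int :=
  (PySem.List.min? ys (fun y => y), PySem.List.max? ys (fun y => y))

theorem pvMM_snoc (ys : List Int) (y : Int) :
    pvMM (ys ++ [y]) =
      (match pvMM ys with
       | (some lo, some hi) => (some (min lo y), some (max hi y))
       | _ => (some y, some y)) := by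
  cases ys with
  | nil => simp [pvMM, PySem.List.min?, PySem.List.max?]
  | cons h t =>
    simp [pvMM, PySem.List.min?_id_cons, PySem.List.max?_id_cons, List.foldl_append]

theorem pvStep_comm (ys : List Int) (row : List (String × String)) :
    (match (PySem.Dict.mk row).get? "Year" with
     | none => pvMM ys
     | some s =>
       match PySem.Int.ofStr? s with
       | none => pvMM ys
       | some y =>
         match pvMM ys with
         | (some lo, some hi) => (some (min lo y), some (max hi y))
         | _ => (some y, some y))
    = pvMM (match (PySem.Dict.mk row).get? "Year" with
            | none => ys
            | some s =>
              match PySem.Int.ofStr? s with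
              | none => ys
              | some y => ys ++ [y]) := by
  cases (PySem.Dict.mk row).get? "Year" with
  | none => rfl
  | some s =>
    cases hp : PySem.Int.ofStr? s with
    | none => simp [hp]
    | some y => simp [hp, pvMM_snoc]

theorem pvLoop_eq (data : List (List (String × String))) (ys : List Int) :
    data.foldl (fun st row =>
      match (PySem.Dict.mk row).get? "Year" with
      | none => st
      | some s =>
        match PySem.Int.ofStr? s with
        | none => st
        | some y =>
          match st with
          | (some lo, some hi) => (some (min lo y), some (max hi y))
          | _ => (some y, some y)) (pvMM ys)
    = pvMM (data.foldl (fun years row =>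
        match (PySem.Dict.mk row).get? "Year" with
        | none => years
        | some s =>
          match PySem.Int.ofStr? s with
          | none => years
          | some y => years ++ [y]) ys) := by
  induction data generalizing ys with
  | nil => rfl
  | cons row rest ih =>
    simp only [List.foldl_cons]
    rw [pvStep_comm ys row]
    exact ih _

-- ===== VERDICT (by name: the statement is the Claim_ definition above) =====
theorem get_year_range_spec : Claim_equal_get_year_range := by
  intro data _
  unfold Spec_get_year_range get_year_range get_year_range_alt
  have h := pvLoop_eq data []
  simp only [pvMM] at h
  rw [show ((none, none) : Option Int × Option Int) =
        (PySem.List.min? ([] : List Int) (fun y => y), PySem.List.max? ([] : List Int) (fun y => y)) from rfl,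
      h]
  cases hys : data.foldl (fun years row =>
      match (PySem.Dict.mk row).get? "Year" with
      | none => years
      | some s =>
        match PySem.Int.ofStr? s with
        | none => years
        | some y => years ++ [y]) [] with
  | nil => simp
  | cons a t => simp [PySem.List.min?_id_cons, PySem.List.max?_id_cons]
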